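-- pv_equiv track=rewrite | github.com/Techinoco/task_mapping_fully_SE | moga_taskmapping_bbdlp.py | mapping_width
-- ===== SOURCE A (Python) =====
-- def mapping_width(individual):
--     """
--     Returns the width of the mapping (number of columns used)
--     """
--     min_x = individual[0][0]
--     max_x = individual[0][0]
--     for i in range(1,len(individual)):
--         if individual[i][0] < min_x:
--             min_x = individual[i][0]
--         elif individual[i][0] > max_x:
--             max_x = individual[i][0]
--     return (max_x - min_x) + 1
-- ===== SOURCE B (Python) =====
-- def mapping_width(individual):
--     xs = sorted(p[0] for p in individual)
--     return xs[-1] - xs[0] + 1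
-- ===== Notes on version B (the rewrite author's own statement) =====
-- stated objective: alternative
-- what changed: Replaces A's single-pass running min/max loop with a sort of the x-coordinates followed by taking the two ends of the sorted list.
import Mathlib
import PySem

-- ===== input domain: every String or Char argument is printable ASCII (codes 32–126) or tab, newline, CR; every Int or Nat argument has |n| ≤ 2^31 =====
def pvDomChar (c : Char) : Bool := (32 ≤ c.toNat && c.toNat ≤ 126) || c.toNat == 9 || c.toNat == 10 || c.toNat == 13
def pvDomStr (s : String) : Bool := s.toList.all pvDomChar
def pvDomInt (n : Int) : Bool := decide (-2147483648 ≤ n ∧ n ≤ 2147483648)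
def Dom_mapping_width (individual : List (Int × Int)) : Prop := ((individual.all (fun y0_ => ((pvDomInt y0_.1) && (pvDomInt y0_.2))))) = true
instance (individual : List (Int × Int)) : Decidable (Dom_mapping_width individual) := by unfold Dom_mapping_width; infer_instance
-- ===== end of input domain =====

-- B sorts the x-coordinates and takes the two ends instead of A's running min/max loop
-- (alternative decomposition, not faster); return values agree on all nonempty inputs.

-- ===== PORT A =====
-- A's loop over range(1, len) with running min_x/max_x, transliterated as a fold over the tail.
def mapping_width (individual : List (Int × Int)) : Int :=
  match individual with
  | [] => 0  -- unreachable: Python raises IndexError here, excluded by Pre_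
  | (x0, _) :: rest =>
    let st := rest.foldl (fun (s : Int × Int) p =>
      if p.1 < s.1 then (p.1, s.2)
      else if p.1 > s.2 then (s.1, p.1)
      else s) (x0, x0)
    (st.2 - st.1) + 1

-- ===== PORT B =====
-- xs = sorted(p[0] for p in individual); return xs[-1] - xs[0] + 1
def mapping_width_alt (individual : List (Int × Int)) : Int :=
  let xs := PySem.List.sorted (individual.map Prod.fst) (fun y => y) false
  match PySem.List.pyGet? xs (-1), PySem.List.pyGet? xs 0 with
  | some last, some first => last - first + 1
  | _, _ => 0  -- unreachable: empty list, Python raises IndexError, excluded by Pre_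

-- ===== PRECONDITION & SPEC =====
-- On the empty list both A and B raise IndexError; it is excluded.
def Pre_mapping_width (individual : List (Int × Int)) : Prop := individual ≠ []
instance (individual : List (Int × Int)) : Decidable (Pre_mapping_width individual) := by unfold Pre_mapping_width; infer_instance
def pvWitness_mapping_width : (List (Int × Int)) := [(2, 3), (0, 1)]
def Spec_mapping_width (individual : List (Int × Int)) (out : Int) : Prop := out = mapping_width_alt individual
instance (individual : List (Int × Int)) (out : Int) : Decidable (Spec_mapping_width individual out) := by unfold Spec_mapping_width; infer_instance

-- ===== CLAIM (what is proved, stated in full; the proofs are below) =====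
def Claim_equal_mapping_width : Prop := ∀ (individual : List (Int × Int)), Dom_mapping_width individual → Pre_mapping_width individual → Spec_mapping_width individual (mapping_width individual)

-- ===== LEMMAS AND PROOFS =====

-- foldl min is determined by the order-theoretic characterisation of the minimum.
theorem foldl_min_eq (l : List Int) : ∀ (a m : Int), (m = a ∨ m ∈ l) → m ≤ a → (∀ y ∈ l, m ≤ y) →
    l.foldl min a = m := by
  induction l with
  | nil =>
    intro a m hmem _ _
    rcases hmem with h | h
    · simp [h]
    · exact absurd h (List.not_mem_nil)
  | cons b t ih =>
    intro a m hmem hle hall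
    simp only [List.foldl_cons]
    have hmb : m ≤ b := hall b (by simp)
    have hmin : m ≤ min a b := le_min hle hmb
    apply ih (min a b) m _ hmin (fun y hy => hall y (by simp [hy]))
    rcases hmem with h | h
    · left; subst h; omega
    · rcases List.mem_cons.mp h with h | h
      · left; subst h; omega
      · right; exact h

theorem foldl_max_eq (l : List Int) : ∀ (a m : Int), (m = a ∨ m ∈ l) → a ≤ m → (∀ y ∈ l, y ≤ m) →
    l.foldl max a = m := by
  induction l with
  | nil =>
    intro a m hmem _ _
    rcases hmem with h | h
    · simp [h]
    · exact absurd h (List.not_mem_nil)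
  | cons b t ih =>
    intro a m hmem hle hall
    simp only [List.foldl_cons]
    have hmb : b ≤ m := hall b (by simp)
    have hmax : max a b ≤ m := max_le hle hmb
    apply ih (max a b) m _ hmax (fun y hy => hall y (by simp [hy]))
    rcases hmem with h | h
    · left; subst h; omega
    · rcases List.mem_cons.mp h with h | h
      · left; subst h; omega
      · right; exact h

-- A's fold with state (running min, running max) computes the min/max of the x-coordinates.
theorem fold_minmax (rest : List (Int × Int)) : ∀ a b : Int, a ≤ b →
    rest.foldl (fun (s : Int × Int) p =>
      if p.1 < s.1 then (p.1, s.2)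
      else if p.1 > s.2 then (s.1, p.1)
      else s) (a, b)
    = ((rest.map Prod.fst).foldl min a, (rest.map Prod.fst).foldl max b) := by
  induction rest with
  | nil => intro a b _; simp
  | cons p t ih =>
    intro a b hab
    simp only [List.foldl_cons, List.map_cons]
    by_cases h1 : p.1 < a
    · simp only [if_pos h1]
      rw [min_eq_right (le_of_lt h1), max_eq_left (le_trans (le_of_lt h1) hab)]
      exact ih p.1 b (le_trans (le_of_lt h1) hab)
    · simp only [if_neg h1]
      by_cases h2 : p.1 > b
      · simp only [if_pos h2]
        rw [min_eq_left (le_of_lt (lt_of_le_of_lt hab h2)), max_eq_right (le_of_lt h2)]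
        exact ih a p.1 (le_of_lt (lt_of_le_of_lt hab h2))
      · simp only [if_neg h2]
        rw [min_eq_left (le_of_not_gt (by omega)), max_eq_left (le_of_not_gt h2)]
        exact ih a b hab

-- In a (≤)-pairwise list every element is at most the last one.
theorem le_getLast_of_pairwise (l : List Int) (h : l.Pairwise (· ≤ ·)) (hne : l ≠ []) :
    ∀ y ∈ l, y ≤ l.getLast hne := by
  induction l with
  | nil => exact absurd rfl hne
  | cons b t ih =>
    intro y hy
    rcases List.pairwise_cons.mp h with ⟨hb, ht⟩
    cases t with
    | nil => simp at hy; simp [hy]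
    | cons c u =>
      rw [List.getLast_cons (by simp)]
      rcases List.mem_cons.mp hy with h' | h'
      · subst h'
        exact le_trans (hb c (by simp)) ((ih ht (by simp)) c (by simp))
      · exact ih ht (by simp) y h'

-- ===== VERDICT (by name: the statement is the Claim_ definition above) =====
theorem mapping_width_spec : Claim_equal_mapping_width := by
  intro individual _ hpre
  unfold Spec_mapping_width
  match individual with
  | [] => exact absurd rfl hpre
  | (x0, y0) :: rest =>
    -- name the sorted list of x-coordinates
    obtain ⟨m, t, hcons⟩ : ∃ m t,
        PySem.List.sorted (((x0, y0) :: rest).map Prod.fst) (fun y => y) false = m :: t := by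
      cases h : PySem.List.sorted (((x0, y0) :: rest).map Prod.fst) (fun y => y) false with
      | nil =>
        have hp := PySem.List.sorted_perm (xs := ((x0, y0) :: rest).map Prod.fst)
          (key := fun y : Int => y) (rev := false)
        rw [h] at hp
        simp [List.nil_perm] at hp
      | cons a b => exact ⟨a, b, rfl⟩
    have hperm : (m :: t).Perm (((x0, y0) :: rest).map Prod.fst) := by
      have hp := PySem.List.sorted_perm (xs := ((x0, y0) :: rest).map Prod.fst)
        (key := fun y : Int => y) (rev := false)
      rwa [hcons] at hp
    have hpw : (m :: t).Pairwise (fun a b : Int => a ≤ b) := by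
      have hp := PySem.List.sorted_pairwise (xs := ((x0, y0) :: rest).map Prod.fst)
        (key := fun y : Int => y)
      rwa [hcons] at hp
    -- the head of the sorted list is a lower bound of all x-coordinates
    have hmin_le : ∀ y ∈ ((x0, y0) :: rest).map Prod.fst, m ≤ y := by
      intro y hy
      rcases List.mem_cons.mp (hperm.mem_iff.mpr hy) with h | h
      · exact h ▸ le_rfl
      · exact (List.pairwise_cons.mp hpw).1 y h
    have hm_mem : m ∈ ((x0, y0) :: rest).map Prod.fst := hperm.mem_iff.mp (by simp)
    -- the last of the sorted list is an upper bound of all x-coordinates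
    have hMne : (m :: t) ≠ ([] : List Int) := by simp
    have hmax_ge : ∀ y ∈ ((x0, y0) :: rest).map Prod.fst, y ≤ (m :: t).getLast hMne := by
      intro y hy
      exact le_getLast_of_pairwise (m :: t) hpw hMne y (hperm.mem_iff.mpr hy)
    have hM_mem : (m :: t).getLast hMne ∈ ((x0, y0) :: rest).map Prod.fst :=
      hperm.mem_iff.mp (List.getLast_mem hMne)
    have hx0 : x0 ∈ ((x0, y0) :: rest).map Prod.fst := by simp
    have hmem_iff : ∀ y : Int, y ∈ ((x0, y0) :: rest).map Prod.fst ↔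
        (y = x0 ∨ y ∈ rest.map Prod.fst) := by
      intro y; simp [List.mem_cons]
    -- evaluate port A
    simp only [mapping_width]
    rw [fold_minmax rest x0 x0 le_rfl]
    have hmin : (rest.map Prod.fst).foldl min x0 = m :=
      foldl_min_eq _ x0 m ((hmem_iff m).mp hm_mem) (hmin_le x0 hx0)
        (fun y hy => hmin_le y ((hmem_iff y).mpr (Or.inr hy)))
    have hmax : (rest.map Prod.fst).foldl max x0 = (m :: t).getLast hMne :=
      foldl_max_eq _ x0 _ ((hmem_iff _).mp hM_mem) (hmax_ge x0 hx0)
        (fun y hy => hmax_ge y ((hmem_iff y).mpr (Or.inr hy)))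
    -- evaluate port B
    simp only [mapping_width_alt, hcons, PySem.List.pyGet?_neg_one,
      PySem.List.pyGet?_zero_cons]
    rw [List.getLast?_eq_some_getLast hMne]
    simp only [hmin, hmax]
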